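-- pv_equiv track=rewrite | github.com/accordingtojim/Alarm_automation_PI | config.py | array_arrangement
-- ===== SOURCE A (Python) =====
-- def array_arrangement(array1,array2):       #example array1= [1,2,3]     #manage if it's not a list but an integer
--     c = 0                                   #        array2= [4,5,6]    ->  array3= [4,5,5,6,6,6] then return the sum of elemnts of array3
--     array3 = []
--     for i in array1:
--         for j in range (1,i+1):
--             array3.append(array2[c])
--         c+=1
--     sum=0
--     for x in array3:
--         sum=sum+x
--     return sum
-- ===== SOURCE B (Python) =====
-- def array_arrangement(array1, array2):
--     # single pass: each array2[k] is counted array1[k] times (0 if array1[k] <= 0)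
--     total = 0
--     for a, b in zip(array1, array2):
--         if a > 0:
--             total += a * b
--     return total
-- ===== Notes on version B (the rewrite author's own statement) =====
-- stated objective: faster
-- what changed: Instead of materialising a list with array2[k] repeated array1[k] times and then summing it, B computes the weighted sum directly in one zip pass as sum(max(a,0)*b).
import Mathlib
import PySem

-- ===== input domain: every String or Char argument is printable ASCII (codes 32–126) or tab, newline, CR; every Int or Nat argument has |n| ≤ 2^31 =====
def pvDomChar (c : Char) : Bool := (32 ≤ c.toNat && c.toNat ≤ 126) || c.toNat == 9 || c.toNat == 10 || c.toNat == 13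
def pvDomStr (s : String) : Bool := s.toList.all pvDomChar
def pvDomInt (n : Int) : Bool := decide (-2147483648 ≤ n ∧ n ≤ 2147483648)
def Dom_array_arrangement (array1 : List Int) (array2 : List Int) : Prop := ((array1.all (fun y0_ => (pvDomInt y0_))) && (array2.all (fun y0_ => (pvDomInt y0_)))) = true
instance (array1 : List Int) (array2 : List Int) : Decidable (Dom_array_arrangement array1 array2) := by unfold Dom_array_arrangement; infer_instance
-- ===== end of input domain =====

-- B computes the weighted sum in one zip pass instead of materialising the repeated list and summing it (measurably faster when array1 entries are large).

-- ===== PORT A =====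
def array_arrangement (array1 : List Int) (array2 : List Int) : Int :=
  -- c = 0; array3 = []; for i in array1: for j in range(1, i+1): array3.append(array2[c]); c += 1
  let st := array1.foldl
    (fun (st : List Int × Int) i =>
      ((PySem.List.pyRange 1 (i + 1) 1).foldl
          (fun a3 _ => a3 ++ [PySem.List.pyGetD array2 st.2 0]) st.1,
        st.2 + 1))
    ([], 0)
  -- sum = 0; for x in array3: sum = sum + x
  st.1.foldl (fun s x => s + x) 0

-- ===== PORT B =====
def array_arrangement_alt (array1 : List Int) (array2 : List Int) : Int :=
  -- total = 0; for a, b in zip(array1, array2): if a > 0: total += a * b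
  (array1.zip array2).foldl (fun total p => if p.1 > 0 then total + p.1 * p.2 else total) 0

-- ===== PRECONDITION & SPEC =====
-- A raises IndexError iff some positive array1[k] has no matching array2[k]; Pre_ excludes exactly that.
def Pre_array_arrangement (array1 : List Int) (array2 : List Int) : Prop :=
  ∀ k ∈ List.range array1.length, 1 ≤ array1.getD k 0 → k < array2.length
instance (array1 : List Int) (array2 : List Int) : Decidable (Pre_array_arrangement array1 array2) := by unfold Pre_array_arrangement; infer_instance
def pvWitness_array_arrangement : List Int × List Int := ([1, 2, 3], [4, 5, 6])

def Spec_array_arrangement (array1 : List Int) (array2 : List Int) (out : Int) : Prop := out = array_arrangement_alt array1 array2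
instance (array1 : List Int) (array2 : List Int) (out : Int) : Decidable (Spec_array_arrangement array1 array2 out) := by unfold Spec_array_arrangement; infer_instance

-- ===== CLAIM (what is proved, stated in full; the proofs are below) =====
def Claim_equal_array_arrangement : Prop := ∀ (array1 : List Int) (array2 : List Int), Dom_array_arrangement array1 array2 → Pre_array_arrangement array1 array2 → Spec_array_arrangement array1 array2 (array_arrangement array1 array2)

-- ===== LEMMAS AND PROOFS =====

-- the inner for-loop only appends a fixed element once per iteration
lemma foldl_append_const {α : Type} (l : List α) (arr : List Int) (v : Int) :
    l.foldl (fun a3 _ => a3 ++ [v]) arr = arr ++ List.replicate l.length v := by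
  induction l generalizing arr with
  | nil => simp
  | cons x t ih => simp [List.foldl, ih, List.replicate_succ]

-- 'sum = sum + f(x)' accumulation is the sum of the mapped list
lemma foldl_add_g {α : Type} (g : α → Int) (l : List α) (a : Int) :
    l.foldl (fun s x => s + g x) a = a + (l.map g).sum := by
  induction l generalizing a with
  | nil => simp
  | cons x t ih => simp [List.foldl, ih, add_assoc]

-- B's guarded accumulation is the sum of the max-weighted products
lemma foldl_if_pos (l : List (Int × Int)) (s : Int) :
    l.foldl (fun total p => if p.1 > 0 then total + p.1 * p.2 else total) s
      = s + (l.map (fun p => max p.1 0 * p.2)).sum := by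
  induction l generalizing s with
  | nil => simp
  | cons p t ih =>
    by_cases hp : p.1 > 0
    · have : max p.1 0 = p.1 := by omega
      simp [List.foldl, ih, hp, this, add_assoc]
    · have : max p.1 0 = 0 := by omega
      simp [List.foldl, ih, hp, this]

-- invariant of A's outer loop
lemma loopA_sum (a2 : List Int) : ∀ (a1 : List Int) (c : Nat) (arr : List Int),
    (∀ k ∈ List.range a1.length, 1 ≤ a1.getD k 0 → c + k < a2.length) →
    ((a1.foldl
        (fun (st : List Int × Int) i =>
          ((PySem.List.pyRange 1 (i + 1) 1).foldl
              (fun a3 _ => a3 ++ [PySem.List.pyGetD a2 st.2 0]) st.1,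
            st.2 + 1))
        (arr, (c : Int))).1).sum
      = arr.sum + ((a1.zip (a2.drop c)).map (fun p => max p.1 0 * p.2)).sum := by
  intro a1
  induction a1 with
  | nil => intro c arr _; simp
  | cons i t ih =>
    intro c arr hpre
    have hlen : (PySem.List.pyRange 1 (i + 1) 1).length = i.toNat := by
      simp [PySem.List.length_pyRange_one]
    have hcast : ((c : Int) + 1) = ((c + 1 : Nat) : Int) := by push_cast; ring
    rw [List.foldl_cons]
    show (List.foldl _ (List.foldl (fun a3 _ => a3 ++ [PySem.List.pyGetD a2 (c : Int) 0]) arr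
        (PySem.List.pyRange 1 (i + 1) 1), (c : Int) + 1) t).1.sum = _
    rw [foldl_append_const, hlen, hcast]
    rw [ih (c + 1) _ (by
      intro k hk hge
      have := hpre (k + 1) (by simp at hk ⊢; omega) (by simpa using hge)
      omega)]
    have hget : PySem.List.pyGetD a2 (c : Int) 0 = a2.getD c 0 := by
      simp [PySem.List.pyGetD_natCast]
    by_cases hc : c < a2.length
    · have hdrop : a2.drop c = a2[c] :: a2.drop (c + 1) :=
        List.drop_eq_getElem_cons hc
      have hmax : ((i.toNat : Int)) = max i 0 := Int.toNat_eq_max i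
      rw [hdrop]
      simp only [List.zip_cons_cons, List.map_cons, List.sum_cons, List.sum_append,
        List.sum_replicate, hget]
      rw [List.getD_eq_getElem?_getD, List.getElem?_eq_getElem hc]
      simp only [Option.getD_some, nsmul_eq_mul]
      rw [hmax]
      ring
    · -- no array2 element left: Pre forces i ≤ 0, so nothing is appended
      have hi : ¬ 1 ≤ i := fun h => hc (by
        have := hpre 0 (by simp) (by simpa using h); omega)
      have hz : i.toNat = 0 := by omega
      have hd1 : a2.drop c = [] := List.drop_eq_nil_of_le (by omega)
      have hd2 : a2.drop (c + 1) = [] := List.drop_eq_nil_of_le (by omega)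
      simp [hz, hd1, hd2]

-- ===== VERDICT (by name: the statement is the Claim_ definition above) =====
theorem array_arrangement_spec : Claim_equal_array_arrangement := by
  intro a1 a2 _ hpre
  unfold Spec_array_arrangement array_arrangement array_arrangement_alt
  have hmain := loopA_sum a2 a1 0 [] (by intro k hk h; have := hpre k hk h; omega)
  simp only [Nat.cast_zero, List.drop_zero, List.sum_nil, zero_add] at hmain
  rw [foldl_add_g (fun x : Int => x), foldl_if_pos]
  simpa using hmain
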